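-- pv_equiv track=rewrite | github.com/erikkinding/adventofcode | aoc2017/ten.py | check_sum_part2
-- ===== SOURCE A (Python) =====
-- import operator
-- from functools import reduce
--
-- def check_sum_part2(hash, block_size):
--
--     checksum = ""
--     i = 0
--     while i < len(hash):
--         hash_segment = hash[i:i+block_size]
--         checksum += format(reduce(operator.xor, hash_segment, 0), '02x')
--         i += block_size
--
--     return checksum
-- ===== SOURCE B (Python) =====
-- def check_sum_part2(hash, block_size):
--     # Single element-wise pass: running XOR accumulator + counter, no slicing, no reduce.
--     acc = 0
--     cnt = 0
--     out = []
--     for x in hash: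
--         acc ^= x
--         cnt += 1
--         if cnt == block_size:
--             out.append(format(acc, '02x'))
--             acc = 0
--             cnt = 0
--     if cnt != 0:
--         out.append(format(acc, '02x'))
--     return "".join(out)
-- ===== Notes on version B (the rewrite author's own statement) =====
-- stated objective: alternative
-- what changed: Replaces the index/slice/reduce loop by a single element-wise pass that XORs into a running accumulator with a block counter, flushing each completed block (and a trailing partial block) into a list joined at the end.
import Mathlib
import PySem

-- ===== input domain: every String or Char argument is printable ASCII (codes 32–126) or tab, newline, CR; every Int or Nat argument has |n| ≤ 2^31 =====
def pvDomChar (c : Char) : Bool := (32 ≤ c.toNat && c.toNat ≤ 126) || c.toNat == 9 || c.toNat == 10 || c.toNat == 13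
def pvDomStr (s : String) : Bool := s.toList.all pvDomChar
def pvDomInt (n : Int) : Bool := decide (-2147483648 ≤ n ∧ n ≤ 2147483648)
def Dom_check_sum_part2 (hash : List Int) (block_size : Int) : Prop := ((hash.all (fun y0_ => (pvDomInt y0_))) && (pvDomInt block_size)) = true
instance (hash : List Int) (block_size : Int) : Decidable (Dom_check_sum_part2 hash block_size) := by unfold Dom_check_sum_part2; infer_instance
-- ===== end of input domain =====

-- B replaces the slice/reduce block loop by a single element-wise pass with a running
-- XOR accumulator and block counter (objective: alternative decomposition, same cost).

-- shared helper: Python's format(n, '02x') (lowercase hex, zero-padded to width 2, '-' for negatives)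
def pyFormat02x (n : Int) : String :=
  if n < 0 then "-" ++ String.ofList (Nat.toDigits 16 (-n).toNat)
  else if n < 16 then "0" ++ String.ofList (Nat.toDigits 16 n.toNat)
  else String.ofList (Nat.toDigits 16 n.toNat)

-- ===== PORT A =====
-- the 'while i < len(hash)' loop; the '1 ≤ block_size' conjunct is a totality guard only:
-- Python's loop never terminates when block_size ≤ 0 and hash ≠ [] (excluded by Pre_).
def csLoop (hash : List Int) (block_size : Int) (i : Int) (checksum : String) : String :=
  if _h : i < (hash.length : Int) ∧ 1 ≤ block_size then
    csLoop hash block_size (i + block_size)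
      (checksum ++ pyFormat02x
        ((PySem.List.slice hash (some i) (some (i + block_size))).foldl PySem.Int.bxor 0))
  else checksum
termination_by ((hash.length : Int) - i).toNat
decreasing_by omega

def check_sum_part2 (hash : List Int) (block_size : Int) : String :=
  csLoop hash block_size 0 ""

-- ===== PORT B =====
-- one step of B's for-loop: XOR x into acc, bump cnt, flush a completed block
def altStep (block_size : Int) (s : Int × Int × String) (x : Int) : Int × Int × String :=
  let acc := PySem.Int.bxor s.1 x
  let cnt := s.2.1 + 1
  if cnt == block_size then (0, 0, s.2.2 ++ pyFormat02x acc) else (acc, cnt, s.2.2)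

-- the final 'if cnt != 0' flush of B
def altFinish (r : Int × Int × String) : String :=
  if r.2.1 ≠ 0 then r.2.2 ++ pyFormat02x r.1 else r.2.2

def check_sum_part2_alt (hash : List Int) (block_size : Int) : String :=
  altFinish (hash.foldl (altStep block_size) (0, 0, ""))

-- ===== PRECONDITION & SPEC =====
-- Pre_ excludes exactly the inputs on which Python A never returns: with a nonempty hash
-- and block_size ≤ 0 the 'while i < len(hash)' loop runs forever.
def Pre_check_sum_part2 (hash : List Int) (block_size : Int) : Prop :=
  hash = [] ∨ 1 ≤ block_size
instance (hash : List Int) (block_size : Int) : Decidable (Pre_check_sum_part2 hash block_size) := by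
  unfold Pre_check_sum_part2; infer_instance

def pvWitness_check_sum_part2 : List Int × Int := ([1, 2, 3, 4, 5], 2)

def Spec_check_sum_part2 (hash : List Int) (block_size : Int) (out : String) : Prop := out = check_sum_part2_alt hash block_size
instance (hash : List Int) (block_size : Int) (out : String) : Decidable (Spec_check_sum_part2 hash block_size out) := by unfold Spec_check_sum_part2; infer_instance

-- ===== CLAIM (what is proved, stated in full; the proofs are below) =====
def Claim_equal_check_sum_part2 : Prop := ∀ (hash : List Int) (block_size : Int), Dom_check_sum_part2 hash block_size → Pre_check_sum_part2 hash block_size → Spec_check_sum_part2 hash block_size (check_sum_part2 hash block_size)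

-- ===== LEMMAS AND PROOFS =====

-- reference chunking both ports are reduced to
def chunksD (b : Nat) : List Int → String
  | [] => ""
  | x :: xs =>
      pyFormat02x (List.foldl PySem.Int.bxor 0 ((x :: xs).take b)) ++ chunksD b (xs.drop (b - 1))
termination_by l => l.length
decreasing_by
  simp only [List.length_drop, List.length_cons]; omega

-- A's loop produces the chunking of the remaining suffix
theorem csLoop_eq_chunksD (hash : List Int) (block_size i : Int) (checksum : String)
    (hb : 1 ≤ block_size) (hi : 0 ≤ i) :
    csLoop hash block_size i checksum
      = checksum ++ chunksD block_size.toNat (hash.drop i.toNat) := by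
  rw [csLoop]
  by_cases hlt : i < (hash.length : Int)
  · simp only [hlt, hb, and_self, dif_pos]
    rw [csLoop_eq_chunksD hash block_size (i + block_size) _ hb (by omega)]
    have hdrop : hash.drop i.toNat ≠ [] := by
      intro hnil
      have := List.drop_eq_nil_iff.mp hnil
      omega
    obtain ⟨x, xs, hxxs⟩ := List.exists_cons_of_ne_nil hdrop
    have hslice : PySem.List.slice hash (some i) (some (i + block_size))
        = (hash.drop i.toNat).take block_size.toNat := by
      rw [PySem.List.slice_toNat hash hi (by omega)]
      congr 1
      omega
    have hdrop2 : hash.drop (i + block_size).toNat = xs.drop (block_size.toNat - 1) := by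
      have : (i + block_size).toNat = i.toNat + block_size.toNat := by omega
      rw [this, ← List.drop_drop, hxxs]
      have hb1 : block_size.toNat = (block_size.toNat - 1) + 1 := by omega
      rw [hb1, List.drop_succ_cons]
      simp
    rw [hslice, hxxs, hdrop2, chunksD, String.append_assoc]
  · simp only [hlt, false_and, dif_neg, not_false_iff]
    have : hash.drop i.toNat = [] := by
      apply List.drop_eq_nil_iff.mpr
      omega
    rw [this, chunksD, String.append_empty]
termination_by ((hash.length : Int) - i).toNat
decreasing_by omega

-- B's fold across (up to) one block: either the list is shorter than the remaining block,
-- or a flush happens after exactly k = remaining-capacity elements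
theorem altStep_block (block_size : Int) (l : List Int) (k : Nat) (acc : Int) (out : String)
    (hk1 : 1 ≤ k) (hk2 : (k : Int) ≤ block_size) :
    List.foldl (altStep block_size) (acc, block_size - (k : Int), out) l
      = if l.length < k then (List.foldl PySem.Int.bxor acc l, block_size - (k : Int) + l.length, out)
        else List.foldl (altStep block_size)
              (0, 0, out ++ pyFormat02x (List.foldl PySem.Int.bxor acc (l.take k))) (l.drop k) := by
  induction l generalizing k acc out with
  | nil =>
      simp only [List.foldl_nil, List.length_nil]
      rw [if_pos (by omega)]
      simp
  | cons x xs ih =>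
      simp only [List.foldl_cons]
      by_cases hk : k = 1
      · subst hk
        have hflush : altStep block_size (acc, block_size - (1 : Int), out) x
            = (0, 0, out ++ pyFormat02x (PySem.Int.bxor acc x)) := by
          simp [altStep]
        simp only [Nat.cast_one]
        rw [hflush]
        have : ¬ ((x :: xs).length < 1) := by simp
        rw [if_neg this]
        simp
      · have hcnt : block_size - (k : Int) + 1 = block_size - ((k - 1 : Nat) : Int) := by omega
        have hne : ¬ (block_size - (k : Int) + 1 = block_size) := by omega
        have hstep : altStep block_size (acc, block_size - (k : Int), out) x
            = (PySem.Int.bxor acc x, block_size - ((k - 1 : Nat) : Int), out) := by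
          simp only [altStep, beq_iff_eq]
          rw [if_neg hne, hcnt]
        rw [hstep, ih (k - 1) (PySem.Int.bxor acc x) out (by omega) (by omega)]
        by_cases hlen : xs.length < k - 1
        · rw [if_pos hlen, if_pos (by simp; omega)]
          simp only [List.length_cons, Prod.mk.injEq, and_true, true_and]
          push_cast
          omega
        · rw [if_neg hlen, if_neg (by simp; omega)]
          have htake : (x :: xs).take k = x :: xs.take (k - 1) := by
            have : k = (k - 1) + 1 := by omega
            rw [this, List.take_succ_cons]
            simp
          have hdrop : (x :: xs).drop k = xs.drop (k - 1) := by
            have : k = (k - 1) + 1 := by omega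
            rw [this, List.drop_succ_cons]
            simp
          rw [htake, hdrop, List.foldl_cons]

-- B equals the reference chunking
theorem alt_eq_chunksD (l : List Int) (block_size : Int) (out : String)
    (hb : 1 ≤ block_size) :
    altFinish (List.foldl (altStep block_size) (0, 0, out) l)
      = out ++ chunksD block_size.toNat l := by
  match l with
  | [] =>
      rw [chunksD, String.append_empty]
      simp [altFinish]
  | x :: xs =>
      have hcast : ((block_size.toNat : Int)) = block_size := by omega
      have h0 : (0 : Int) = block_size - (block_size.toNat : Int) := by omega
      rw [show ((0 : Int), (0 : Int), out) = ((0 : Int), block_size - (block_size.toNat : Int), out) by rw [← h0]]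
      rw [altStep_block block_size (x :: xs) block_size.toNat 0 out (by omega) (by omega)]
      by_cases hlen : (x :: xs).length < block_size.toNat
      · rw [if_pos hlen]
        have hfin : altFinish (List.foldl PySem.Int.bxor 0 (x :: xs),
            block_size - (block_size.toNat : Int) + ((x :: xs).length : Int), out)
            = out ++ pyFormat02x (List.foldl PySem.Int.bxor 0 (x :: xs)) := by
          simp only [altFinish]
          rw [if_pos (by simp only [List.length_cons]; push_cast; omega)]
        rw [hfin, chunksD]
        have htake : (x :: xs).take block_size.toNat = x :: xs := by
          apply List.take_of_length_le
          omega
        have hdrop : xs.drop (block_size.toNat - 1) = [] := by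
          apply List.drop_eq_nil_iff.mpr
          simp only [List.length_cons] at hlen
          omega
        rw [htake, hdrop, chunksD, String.append_empty]
      · rw [if_neg hlen]
        rw [alt_eq_chunksD ((x :: xs).drop block_size.toNat) block_size _ hb]
        rw [chunksD, String.append_assoc]
        congr 1
        congr 1
        have : block_size.toNat = (block_size.toNat - 1) + 1 := by omega
        rw [this, List.drop_succ_cons]
        simp
  termination_by l.length
  decreasing_by simp only [List.length_drop, List.length_cons]; omega

-- ===== VERDICT (by name: the statement is the Claim_ definition above) =====
theorem check_sum_part2_spec : Claim_equal_check_sum_part2 := by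
  intro hash block_size _ hpre
  unfold Spec_check_sum_part2 check_sum_part2 check_sum_part2_alt
  rcases hpre with hnil | hb
  · subst hnil
    rw [csLoop]
    simp [altFinish]
  · rw [csLoop_eq_chunksD hash block_size 0 "" hb le_rfl,
        alt_eq_chunksD hash block_size "" hb]
    simp
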